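-- pv_equiv track=rewrite | github.com/tumuum/prog-book | code/no_111.py | no_111_alt
-- ===== SOURCE A (Python) =====
-- def no_111_alt(word):
-- 	count = 0
-- 	for s in word:
-- 		if s == '1':
-- 			count = count + 1
-- 		else:
-- 			count = 0
-- 		if count == 3:
-- 			return False
--
-- 	return True
-- ===== SOURCE B (Python) =====
-- def no_111_alt(word):
-- 	return '111' not in word
-- ===== Notes on version B (the rewrite author's own statement) =====
-- stated objective: idiomatic
-- what changed: Replaced the resetting manual counter loop with a single substring membership test for a run of three consecutive ones.
import Mathlib
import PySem

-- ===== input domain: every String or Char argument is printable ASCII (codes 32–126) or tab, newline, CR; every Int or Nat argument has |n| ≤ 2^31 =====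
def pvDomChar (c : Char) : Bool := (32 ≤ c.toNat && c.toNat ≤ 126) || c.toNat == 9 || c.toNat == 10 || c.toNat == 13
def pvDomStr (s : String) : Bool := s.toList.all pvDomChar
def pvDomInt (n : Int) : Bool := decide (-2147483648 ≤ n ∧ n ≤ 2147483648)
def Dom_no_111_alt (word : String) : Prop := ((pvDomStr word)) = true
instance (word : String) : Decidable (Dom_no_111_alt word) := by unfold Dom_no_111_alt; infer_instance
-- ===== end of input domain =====

-- B replaces A's resetting counter loop by the idiomatic substring test '111' not in word.

-- ===== PORT A =====
-- A's for-loop with early return, as structural recursion carrying the counter.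
def no_111_altLoop : List Char → Int → Bool
  | [], _ => true
  | s :: rest, count =>
    let count' := if s == '1' then count + 1 else 0
    if count' == 3 then false else no_111_altLoop rest count'

def no_111_alt (word : String) : Bool := no_111_altLoop word.toList 0

-- ===== PORT B =====
def no_111_alt_alt (word : String) : Bool := !(PySem.Str.isIn "111" word)

-- ===== PRECONDITION & SPEC =====
def Spec_no_111_alt (word : String) (out : Bool) : Prop := out = no_111_alt_alt word
instance (word : String) (out : Bool) : Decidable (Spec_no_111_alt word out) := by unfold Spec_no_111_alt; infer_instance

-- ===== CLAIM (what is proved, stated in full; the proofs are below) =====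
def Claim_equal_no_111_alt : Prop := ∀ (word : String), Dom_no_111_alt word → Spec_no_111_alt word (no_111_alt word)

-- ===== LEMMAS AND PROOFS =====

-- Invariant of A's loop: with a trailing count c ∈ {0,1,2} of '1's already seen,
-- the loop returns false iff the remaining (3-c) ones come immediately, or "111" occurs later.
theorem no_111_altLoop_char (xs : List Char) : ∀ (c : Int), c = 0 ∨ c = 1 ∨ c = 2 →
    (no_111_altLoop xs c = false ↔
      List.replicate (3 - c).toNat '1' <+: xs ∨ ['1', '1', '1'] <:+: xs) := by
  induction xs with
  | nil =>
    intro c hc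
    rcases hc with h | h | h <;> subst h <;>
      simp [no_111_altLoop, List.replicate]
  | cons a rest ih =>
    intro c hc
    by_cases ha : a = '1'
    · subst ha
      have hcons : ∀ (l : List Char), l <+: rest → '1' :: l <+: '1' :: rest := by
        intro l h
        exact List.cons_prefix_cons.mpr ⟨rfl, h⟩
      rcases hc with h | h | h <;> subst h
      · rw [show ((3 : Int) - 0).toNat = 3 from rfl]
        rw [show no_111_altLoop ('1' :: rest) 0 = no_111_altLoop rest 1 by
          simp [no_111_altLoop]]
        rw [ih 1 (by omega)]
        rw [show ((3 : Int) - 1).toNat = 2 from rfl]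
        constructor
        · rintro (h | h)
          · exact Or.inl (by simpa [List.replicate] using hcons _ (by simpa [List.replicate] using h))
          · exact Or.inr (h.trans (List.suffix_cons '1' rest).isInfix)
        · rintro (h | h)
          · simp only [List.replicate, List.cons_prefix_cons] at h ⊢
            exact Or.inl h.2
          · rcases (List.infix_cons_iff).1 h with h | h
            · simp only [List.cons_prefix_cons] at h
              exact Or.inl (by simpa [List.replicate] using h.2)
            · exact Or.inr h
      · rw [show no_111_altLoop ('1' :: rest) 1 = no_111_altLoop rest 2 by
          simp [no_111_altLoop]]
        rw [ih 2 (by omega)]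
        rw [show ((3 : Int) - 1).toNat = 2 from rfl, show ((3 : Int) - 2).toNat = 1 from rfl]
        constructor
        · rintro (h | h)
          · exact Or.inl (by simpa [List.replicate] using hcons _ (by simpa [List.replicate] using h))
          · exact Or.inr (h.trans (List.suffix_cons '1' rest).isInfix)
        · rintro (h | h)
          · simp only [List.replicate, List.cons_prefix_cons] at h ⊢
            exact Or.inl h.2
          · rcases (List.infix_cons_iff).1 h with h | h
            · simp only [List.cons_prefix_cons] at h
              rcases h with ⟨-, h2⟩
              exact Or.inl (by simpa [List.replicate] using
                (show ['1'] <+: ['1', '1'] from ⟨['1'], rfl⟩).trans h2)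
            · exact Or.inr h
      · rw [show no_111_altLoop ('1' :: rest) 2 = false by simp [no_111_altLoop]]
        rw [show ((3 : Int) - 2).toNat = 1 from rfl]
        simp [List.replicate]
    · have hne : (a == '1') = false := by simpa using ha
      have hstep : no_111_altLoop (a :: rest) c = no_111_altLoop rest 0 := by
        simp [no_111_altLoop, hne]
      rw [hstep, ih 0 (by omega)]
      have hpos : 0 < ((3 : Int) - c).toNat := by omega
      have hpre : ¬ (List.replicate ((3 : Int) - c).toNat '1' <+: a :: rest) := by
        intro hp
        rcases Nat.exists_eq_add_of_lt hpos with ⟨m, hm⟩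
        rw [show ((3 : Int) - c).toNat = m + 1 by omega, List.replicate_succ,
          List.cons_prefix_cons] at hp
        exact ha hp.1.symm
      have hinf : (['1', '1', '1'] <:+: a :: rest) ↔ (['1', '1', '1'] <:+: rest) := by
        rw [List.infix_cons_iff]
        constructor
        · rintro (h | h)
          · exact absurd (List.cons_prefix_cons.1 h).1.symm ha
          · exact h
        · exact Or.inr
      rw [show ((3 : Int) - 0).toNat = 3 from rfl]
      constructor
      · rintro (h | h)
        · exact Or.inr (hinf.2 (by simpa [List.replicate] using h.isInfix))
        · exact Or.inr (hinf.2 h)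
      · rintro (h | h)
        · exact absurd h hpre
        · exact Or.inr (hinf.1 h)

theorem no_111_alt_eq (word : String) : no_111_alt word = no_111_alt_alt word := by
  have h := no_111_altLoop_char word.toList 0 (by omega)
  rw [show ((3 : Int) - 0).toNat = 3 from rfl] at h
  have hinfix : no_111_altLoop word.toList 0 = false ↔ (['1','1','1'] <:+: word.toList) := by
    rw [h]
    constructor
    · rintro (hp | hi)
      · exact (by simpa [List.replicate] using hp.isInfix)
      · exact hi
    · exact Or.inr
  have hb : no_111_alt_alt word = false ↔ (['1','1','1'] <:+: word.toList) := by
    unfold no_111_alt_alt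
    rw [Bool.not_eq_false', PySem.Str.isIn_iff_infix]
    constructor <;> intro hx <;> simpa using hx
  unfold no_111_alt
  cases hA : no_111_altLoop word.toList 0 <;> cases hB : no_111_alt_alt word
  · rfl
  · exact absurd (hb.2 (hinfix.1 hA)) (by simp [hB])
  · exact absurd (hinfix.2 (hb.1 hB)) (by simp [hA])
  · rfl

-- ===== VERDICT (by name: the statement is the Claim_ definition above) =====
theorem no_111_alt_spec : Claim_equal_no_111_alt := by
  intro word _
  unfold Spec_no_111_alt
  exact no_111_alt_eq word
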